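-- pv_equiv track=rewrite | github.com/araresoul110/advent-of-code-2023 | day3.py | find_part_numbers
-- ===== SOURCE A (Python) =====
-- def find_part_numbers(Lines):
--     numbers = []
--     special_symbols = ["@", "#", "$", "%", "&", "*", "/", "-", "=", "+"]
--
--     for line_number, line in enumerate(Lines):
--         index = 0
--         while index < len(line):
--             if line[index].isdigit():
--                 start_index = index
--                 end_index = min(start_index + 1, len(line))
--                 x = 1
--                 while line[start_index + x].isdigit():
--                     end_index += 1
--                     x += 1
--                     if start_index + x >= len(line):
--                         break
--
--                 square = []
--                 for x in range(-1, 2):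
--                     if line_number + x >= 0 and line_number + x < len(Lines):
--                         square.append(Lines[line_number + x][(max(start_index - 1,0)):(end_index + 1)])
--
--                 for element in square:
--                     for this_char in element:
--                         if this_char in special_symbols:
--                             numbers.append(int(Lines[line_number][start_index:end_index]))
--                             break
--
--                 index = end_index
--             index += 1
--     return numbers
-- ===== SOURCE B (Python) =====
-- def _digit_runs(line):
--     """Maximal runs of digits as (start, end) pairs, one left-to-right pass."""
--     runs = []
--     start = None
--     for i, c in enumerate(line):
--         if c.isdigit():
--             if start is None:
--                 start = i
--         elif start is not None:
--             runs.append((start, i))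
--             start = None
--     if start is not None:
--         runs.append((start, len(line)))
--     return runs
--
--
-- def find_part_numbers(Lines):
--     specials = set("@#$%&*/-=+")
--     # index: for each row, the set of columns holding a special symbol
--     symcols = [{i for i, c in enumerate(line) if c in specials} for line in Lines]
--     numbers = []
--     for r, line in enumerate(Lines):
--         for s, e in _digit_runs(line):
--             val = int(line[s:e])
--             window = range(max(s - 1, 0), e + 1)
--             for rr in range(max(r - 1, 0), min(r + 2, len(Lines))):
--                 if not symcols[rr].isdisjoint(window):
--                     numbers.append(val)
--     return numbers
-- ===== Notes on version B (the rewrite author's own statement) =====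
-- stated objective: alternative
-- what changed: B replaces A's nested while-scan with neighbourhood string slices by a precomputed per-row index of special-symbol columns plus a single-pass accumulator run detector, testing each number's window against the symbol-column set of the up-to-three neighbour rows.
import Mathlib
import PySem

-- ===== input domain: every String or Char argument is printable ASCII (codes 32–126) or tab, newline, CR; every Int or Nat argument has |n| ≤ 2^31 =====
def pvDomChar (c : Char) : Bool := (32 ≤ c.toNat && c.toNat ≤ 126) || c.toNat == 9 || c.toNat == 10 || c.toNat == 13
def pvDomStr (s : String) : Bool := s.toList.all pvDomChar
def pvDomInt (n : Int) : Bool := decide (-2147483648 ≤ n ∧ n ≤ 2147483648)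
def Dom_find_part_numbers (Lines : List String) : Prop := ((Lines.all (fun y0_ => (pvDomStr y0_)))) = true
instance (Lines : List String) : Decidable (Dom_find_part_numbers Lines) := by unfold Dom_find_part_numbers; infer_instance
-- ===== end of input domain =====

-- B builds a per-row index of special-symbol columns and detects digit runs in one
-- accumulator pass, instead of A's nested while-scan over neighbourhood slices
-- (objective: alternative structure, similar cost). Equivalence is about the return value.

-- ===== PORT A =====
-- special_symbols
def pvSpecial : List Char := ['@', '#', '$', '%', '&', '*', '/', '-', '=', '+']

-- int(line[s:e]) ; the slice bounds used by both programs are nonnegative.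
-- getD 0 is never reached on admitted inputs: the slice is a nonempty digit run.
def pvNumAt (cs : List Char) (s e : Int) : Int :=
  (PySem.Int.ofChars? (PySem.List.slice cs (some s) (some e))).getD 0

-- A's inner 'while line[start_index + x].isdigit():' loop; the out-of-range access that
-- makes Python raise IndexError is rendered by the non-digit default ' ' and excluded by Pre_.
-- Char.isDigit is exact for str.isdigit on the printable-ASCII domain.
def aRunEnd (cs : List Char) (start : Nat) : Nat → Nat → Nat → Nat
  | _, e, 0 => e
  | x, e, fuel + 1 =>
    if (cs.getD (start + x) ' ').isDigit then
      if start + (x + 1) ≥ cs.length then e + 1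
      else aRunEnd cs start (x + 1) (e + 1) fuel
    else e

-- A's outer 'while index < len(line):' loop (fuel = enough iterations; index strictly grows).
def aScan (L : List (List Char)) (ln : Int) (cs : List Char) :
    Nat → Nat → List Int → List Int
  | _, 0, acc => acc
  | index, fuel + 1, acc =>
    if index < cs.length then
      if (cs.getD index ' ').isDigit then
        let start := index
        let e := aRunEnd cs start 1 (min (start + 1) cs.length) cs.length
        let square := ([-1, 0, 1] : List Int).foldl (fun sq x =>
          if 0 ≤ ln + x ∧ ln + x < (L.length : Int) then
            sq ++ [PySem.List.slice ((PySem.List.pyGet? L (ln + x)).getD [])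
                     (some (max ((start : Int) - 1) 0)) (some ((e : Int) + 1))]
          else sq) []
        let acc := square.foldl (fun a el =>
          if el.any (fun c => pvSpecial.contains c) then a ++ [pvNumAt cs start e] else a) acc
        aScan L ln cs (e + 1) fuel acc
      else aScan L ln cs (index + 1) fuel acc
    else acc

def find_part_numbers (Lines : List String) : List Int :=
  let L := Lines.map String.toList
  (PySem.List.enumerate L).foldl (fun acc p => aScan L p.1 p.2 0 (p.2.length + 1) acc) []

-- ===== PORT B =====
-- B's single-pass digit-run detector: state = optional start of the current run.
def bRunsAux : List Char → Nat → Option Nat → List (Nat × Nat)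
  | [], _, none => []
  | [], i, some s => [(s, i)]
  | c :: rest, i, none =>
    if c.isDigit then bRunsAux rest (i + 1) (some i) else bRunsAux rest (i + 1) none
  | c :: rest, i, some s =>
    if c.isDigit then bRunsAux rest (i + 1) (some s) else (s, i) :: bRunsAux rest (i + 1) none

def bRuns (cs : List Char) : List (Nat × Nat) := bRunsAux cs 0 none

-- {i for i, c in enumerate(line) if c in specials}
def bSymCols (cs : List Char) : PySem.Set Int :=
  PySem.Set.ofList ((PySem.List.enumerate cs).filterMap
    (fun p => if pvSpecial.contains p.2 then some p.1 else none))

def find_part_numbers_alt (Lines : List String) : List Int :=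
  let L := Lines.map String.toList
  let sym := L.map bSymCols
  (PySem.List.enumerate L).foldl (fun acc p =>
    (bRuns p.2).foldl (fun acc se =>
      let val := pvNumAt p.2 (se.1 : Int) (se.2 : Int)
      let window := PySem.List.pyRange (max ((se.1 : Int) - 1) 0) ((se.2 : Int) + 1) 1
      (PySem.List.pyRange (max (p.1 - 1) 0) (min (p.1 + 2) (L.length : Int)) 1).foldl
        (fun acc rr =>
          if ¬ PySem.Set.isdisjoint ((PySem.List.pyGet? sym rr).getD []) window
          then acc ++ [val] else acc) acc) acc) []

-- ===== PRECONDITION & SPEC =====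
-- a line on which A's inner while raises IndexError: a maximal digit run of length 1
-- ending at the line's last character
def pvBadLine (cs : List Char) : Bool :=
  match cs.reverse with
  | [] => false
  | [c] => c.isDigit
  | c :: d :: _ => c.isDigit && !d.isDigit

-- Pre_ excludes exactly the inputs on which the Python A raises IndexError
-- (some line ends in a single-digit maximal run); A returns on every other input.
def Pre_find_part_numbers (Lines : List String) : Prop :=
  ∀ s ∈ Lines, pvBadLine s.toList = false
instance (Lines : List String) : Decidable (Pre_find_part_numbers Lines) := by
  unfold Pre_find_part_numbers; infer_instance

def pvWitness_find_part_numbers : List String := ["467..114..", "...*......", ".35..633.#"]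

def Spec_find_part_numbers (Lines : List String) (out : List Int) : Prop :=
  out = find_part_numbers_alt Lines
instance (Lines : List String) (out : List Int) : Decidable (Spec_find_part_numbers Lines out) := by
  unfold Spec_find_part_numbers; infer_instance

-- ===== CLAIM (what is proved, stated in full; the proofs are below) =====
def Claim_equal_find_part_numbers : Prop :=
  ∀ (Lines : List String), Dom_find_part_numbers Lines → Pre_find_part_numbers Lines →
    Spec_find_part_numbers Lines (find_part_numbers Lines)

-- ===== LEMMAS AND PROOFS =====

def emitA (L : List (List Char)) (ln : Int) (cs : List Char) (acc : List Int) (se : Nat × Nat) :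
    List Int :=
  (([-1, 0, 1] : List Int).foldl (fun sq x =>
      if 0 ≤ ln + x ∧ ln + x < (L.length : Int) then
        sq ++ [PySem.List.slice ((PySem.List.pyGet? L (ln + x)).getD [])
                 (some (max ((se.1 : Int) - 1) 0)) (some ((se.2 : Int) + 1))]
      else sq) []).foldl (fun a el =>
    if el.any (fun c => pvSpecial.contains c) then a ++ [pvNumAt cs se.1 se.2] else a) acc

lemma drop_takeWhile_len (p : Char → Bool) (l : List Char) :
    l.drop (l.takeWhile p).length = l.dropWhile p := by
  induction l with
  | nil => rfl
  | cons c cs ih => by_cases h : p c <;> simp [h, ih]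

lemma aRunEnd_eq (cs : List Char) (start : Nat) :
    ∀ fuel x e, ((cs.drop (start + x)).takeWhile Char.isDigit).length ≤ fuel →
      aRunEnd cs start x e fuel = e + ((cs.drop (start + x)).takeWhile Char.isDigit).length := by
  intro fuel
  induction fuel with
  | zero =>
    intro x e h
    simp only [Nat.le_zero, List.length_eq_zero_iff] at h
    simp [aRunEnd, h]
  | succ fuel ih =>
    intro x e h
    by_cases hi : start + x < cs.length
    · have hdrop := List.drop_eq_getElem_cons hi
      have hget : cs.getD (start + x) ' ' = cs[start + x] := List.getD_eq_getElem _ _ hi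
      by_cases hd : cs[start + x].isDigit
      · have htw : ((cs.drop (start + x)).takeWhile Char.isDigit).length
            = ((cs.drop (start + x + 1)).takeWhile Char.isDigit).length + 1 := by
          rw [hdrop, List.takeWhile_cons_of_pos hd, List.length_cons]
        by_cases hend : start + (x + 1) ≥ cs.length
        · have hnil : cs.drop (start + x + 1) = [] := List.drop_eq_nil_of_le (by omega)
          have : aRunEnd cs start x e (fuel + 1) = e + 1 := by
            unfold aRunEnd; rw [hget]; simp [hd, hend]
          rw [this, htw, hnil]; simp
        · have hrec : aRunEnd cs start x e (fuel + 1) = aRunEnd cs start (x + 1) (e + 1) fuel := by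
            conv_lhs => unfold aRunEnd
            rw [hget]; simp only [hd, if_true]; rw [if_neg hend]
          have harg : start + (x + 1) = start + x + 1 := by omega
          have hih := ih (x + 1) (e + 1) (by rw [harg]; omega)
          rw [hrec, hih, harg, htw]; omega
      · have htw : ((cs.drop (start + x)).takeWhile Char.isDigit) = [] := by
          rw [hdrop, List.takeWhile_cons_of_neg (by simp [hd])]
        have : aRunEnd cs start x e (fuel + 1) = e := by
          unfold aRunEnd; rw [hget]; simp [hd]
        rw [this, htw]; simp
    · have hdrop : cs.drop (start + x) = [] := List.drop_eq_nil_of_le (by omega)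
      have hget : cs.getD (start + x) ' ' = ' ' := List.getD_eq_default _ _ (by omega)
      have : aRunEnd cs start x e (fuel + 1) = e := by
        unfold aRunEnd; rw [hget]; simp
      rw [this, hdrop]; simp

lemma bRunsAux_some (rest : List Char) :
    ∀ i s, bRunsAux rest i (some s) =
      (s, i + (rest.takeWhile Char.isDigit).length) ::
        bRunsAux (rest.drop (rest.takeWhile Char.isDigit).length)
          (i + (rest.takeWhile Char.isDigit).length) none := by
  induction rest with
  | nil => intro i s; simp [bRunsAux]
  | cons c r ih =>
    intro i s
    by_cases hd : c.isDigit
    · have h1 : i + 1 + (r.takeWhile Char.isDigit).length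
          = i + ((r.takeWhile Char.isDigit).length + 1) := by omega
      simp only [bRunsAux, hd, if_pos, ih (i + 1) s, List.takeWhile_cons, List.length_cons]
      rw [h1]
      simp [hd]
    · simp [bRunsAux, hd, List.takeWhile_cons]






lemma bRunsAux_shift (cs : List Char) (e : Nat)
    (hnd : ∀ (h : e < cs.length), cs[e].isDigit = false) :
    bRunsAux (cs.drop e) e none = bRunsAux (cs.drop (e + 1)) (e + 1) none := by
  by_cases he : e < cs.length
  · rw [List.drop_eq_getElem_cons he]
    simp [bRunsAux, hnd he]
  · have h1 : cs.drop e = [] := List.drop_eq_nil_of_le (by omega)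
    have h2 : cs.drop (e + 1) = [] := List.drop_eq_nil_of_le (by omega)
    rw [h1, h2]
    simp [bRunsAux]

lemma dropWhile_head_false (p : Char → Bool) (l : List Char) (x : Char) (xs : List Char)
    (h : l.dropWhile p = x :: xs) : p x = false := by
  induction l with
  | nil => simp at h
  | cons c cs ih =>
    rw [List.dropWhile_cons] at h
    by_cases hc : p c
    · exact ih (by simpa [hc] using h)
    · simp [hc] at h
      simp [← h.1, hc]

lemma aScan_eq (L : List (List Char)) (ln : Int) (cs : List Char) :
    ∀ fuel index acc, cs.length ≤ index + fuel →
      aScan L ln cs index fuel acc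
        = (bRunsAux (cs.drop index) index none).foldl (emitA L ln cs) acc := by
  intro fuel
  induction fuel with
  | zero =>
    intro index acc h
    rw [List.drop_eq_nil_of_le (by omega)]
    rfl
  | succ fuel ih =>
    intro index acc h
    by_cases hlt : index < cs.length
    · have hdrop := List.drop_eq_getElem_cons hlt
      have hget : cs.getD index ' ' = cs[index] := List.getD_eq_getElem _ _ hlt
      by_cases hd : cs[index].isDigit
      · -- digit branch
        have hmin : min (index + 1) cs.length = index + 1 := by omega
        set k := ((cs.drop (index + 1)).takeWhile Char.isDigit).length with hk
        have hkle : k ≤ cs.length := by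
          calc k ≤ (cs.drop (index + 1)).length := (List.takeWhile_sublist _).length_le
            _ ≤ cs.length := by simp
        have hend : aRunEnd cs index 1 (min (index + 1) cs.length) cs.length
            = index + 1 + k := by
          rw [hmin, aRunEnd_eq cs index cs.length 1 (index + 1) (by simpa using hkle)]
        have hstep : aScan L ln cs index (fuel + 1) acc
            = aScan L ln cs (index + 1 + k + 1) fuel (emitA L ln cs acc (index, index + 1 + k)) := by
          conv_lhs => unfold aScan
          rw [if_pos hlt, hget]
          simp only [hd, if_true, hend, emitA]
        rw [hstep, ih _ _ (by omega)]
        -- right-hand side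
        rw [hdrop]
        have hrw : bRunsAux (cs[index] :: cs.drop (index + 1)) index none
            = bRunsAux (cs.drop (index + 1)) (index + 1) (some index) := by
          simp [bRunsAux, hd]
        rw [hrw, bRunsAux_some]
        have hdd : (cs.drop (index + 1)).drop k = cs.drop (index + 1 + k) := by
          rw [List.drop_drop]
        have hnd : ∀ (hh : index + 1 + k < cs.length), cs[index + 1 + k].isDigit = false := by
          intro hh
          have hdw : (cs.drop (index + 1)).dropWhile Char.isDigit
              = cs[index + 1 + k] :: cs.drop (index + 1 + k + 1) := by
            rw [← drop_takeWhile_len, ← hk, hdd, List.drop_eq_getElem_cons hh]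
          exact dropWhile_head_false _ _ _ _ hdw
        have hshift := bRunsAux_shift cs (index + 1 + k) hnd
        rw [List.foldl_cons, hdd, hshift]
      · have hstep : aScan L ln cs index (fuel + 1) acc = aScan L ln cs (index + 1) fuel acc := by
          conv_lhs => unfold aScan
          rw [if_pos hlt, hget]
          simp [hd]
        rw [hstep, ih _ _ (by omega), hdrop]
        simp [bRunsAux, hd]
    · have hdrop : cs.drop index = [] := List.drop_eq_nil_of_le (by omega)
      have : aScan L ln cs index (fuel + 1) acc = acc := by
        unfold aScan; rw [if_neg hlt]
      rw [this, hdrop]; rfl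

lemma pyRange3 (a b : Int) (h : b = a + 3) : PySem.List.pyRange a b 1 = [a, a + 1, a + 2] := by
  rw [PySem.List.pyRange_one_cons (by omega), PySem.List.pyRange_one_cons (by omega),
    PySem.List.pyRange_one_cons (by omega), PySem.List.pyRange_one_eq_nil (by omega)]
  simp only [List.cons.injEq, and_true, true_and]
  omega
lemma pyRange2 (a b : Int) (h : b = a + 2) : PySem.List.pyRange a b 1 = [a, a + 1] := by
  rw [PySem.List.pyRange_one_cons (by omega), PySem.List.pyRange_one_cons (by omega),
    PySem.List.pyRange_one_eq_nil (by omega)]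
lemma pyRange1' (a b : Int) (h : b = a + 1) : PySem.List.pyRange a b 1 = [a] := by
  rw [PySem.List.pyRange_one_cons (by omega), PySem.List.pyRange_one_eq_nil (by omega)]

lemma squareA_map (g : Int → List Char) (ln N : Int) (hN : 0 ≤ N) :
    ([-1, 0, 1] : List Int).foldl (fun sq x =>
      if 0 ≤ ln + x ∧ ln + x < N then sq ++ [g (ln + x)] else sq) []
    = (PySem.List.pyRange (max (ln - 1) 0) (min (ln + 2) N) 1).map g := by
  simp only [List.foldl_cons, List.foldl_nil]
  by_cases h1 : 0 ≤ ln + -1 ∧ ln + -1 < N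
  · by_cases h3 : 0 ≤ ln + 1 ∧ ln + 1 < N
    · rw [if_pos h1, if_pos (by omega : 0 ≤ ln + 0 ∧ ln + 0 < N), if_pos h3,
        show max (ln - 1) 0 = ln - 1 by omega, pyRange3 _ _ (by omega : min (ln + 2) N = (ln - 1) + 3)]
      simp only [List.map_cons, List.map_nil, List.nil_append]
      ring_nf
      simp
    · by_cases h2 : 0 ≤ ln + 0 ∧ ln + 0 < N
      · rw [if_pos h1, if_pos h2, if_neg h3,
          show max (ln - 1) 0 = ln - 1 by omega, pyRange2 _ _ (by omega : min (ln + 2) N = (ln - 1) + 2)]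
        simp only [List.map_cons, List.map_nil, List.nil_append]
        ring_nf
        simp
      · rw [if_pos h1, if_neg h2, if_neg h3,
          show max (ln - 1) 0 = ln - 1 by omega, pyRange1' _ _ (by omega : min (ln + 2) N = (ln - 1) + 1)]
        simp only [List.map_cons, List.map_nil, List.nil_append]
        ring_nf
  · by_cases h2 : 0 ≤ ln + 0 ∧ ln + 0 < N
    · by_cases h3 : 0 ≤ ln + 1 ∧ ln + 1 < N
      · rw [if_neg h1, if_pos h2, if_pos h3,
          show max (ln - 1) 0 = ln by omega, pyRange2 _ _ (by omega : min (ln + 2) N = ln + 2)]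
        simp only [List.map_cons, List.map_nil, List.nil_append]
        ring_nf
        simp
      · rw [if_neg h1, if_pos h2, if_neg h3,
          show max (ln - 1) 0 = ln by omega, pyRange1' _ _ (by omega : min (ln + 2) N = ln + 1)]
        simp only [List.map_cons, List.map_nil, List.nil_append]
        ring_nf
    · by_cases h3 : 0 ≤ ln + 1 ∧ ln + 1 < N
      · rw [if_neg h1, if_neg h2, if_pos h3,
          show max (ln - 1) 0 = ln + 1 by omega, pyRange1' _ _ (by omega : min (ln + 2) N = (ln + 1) + 1)]
        simp only [List.map_cons, List.map_nil, List.nil_append]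
      · rw [if_neg h1, if_neg h2, if_neg h3,
          PySem.List.pyRange_one_eq_nil (by omega), List.map_nil]

lemma mem_take_drop (l : List Char) (a b : Nat) (c : Char) :
    c ∈ (l.drop a).take b ↔ ∃ k, a ≤ k ∧ k < a + b ∧ ∃ h : k < l.length, l[k] = c := by
  constructor
  · intro hc
    obtain ⟨j, hj, hget⟩ := List.mem_iff_getElem.mp hc
    simp only [List.length_take, List.length_drop, lt_min_iff] at hj
    have hk : a + j < l.length := by omega
    refine ⟨a + j, by omega, by omega, hk, ?_⟩
    rw [List.getElem_take, List.getElem_drop] at hget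
    exact hget
  · rintro ⟨k, h1, h2, h3, h4⟩
    apply List.mem_iff_getElem.mpr
    refine ⟨k - a, ?_, ?_⟩
    · simp only [List.length_take, List.length_drop, lt_min_iff]; omega
    · rw [List.getElem_take, List.getElem_drop]
      have : a + (k - a) = k := by omega
      simp_rw [this]
      exact h4

lemma mem_bSymCols (row : List Char) (x : Int) :
    x ∈ bSymCols row ↔ ∃ k : Nat, ∃ h : k < row.length,
      x = (k : Int) ∧ row[k] ∈ pvSpecial := by
  unfold bSymCols
  rw [PySem.Set.mem_ofList]
  simp only [List.mem_filterMap, PySem.List.mem_enumerate_iff]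
  constructor
  · rintro ⟨p, ⟨k, hk, hp⟩, hif⟩
    subst hp
    by_cases hc : row[k] ∈ pvSpecial
    · simp [hc] at hif
      exact ⟨k, hk, by omega, hc⟩
    · simp [hc] at hif
  · rintro ⟨k, hk, hx, hc⟩
    exact ⟨((k : Int), row[k]), ⟨k, hk, by simp⟩, by simp [hc, hx]⟩

lemma any_slice_eq (row : List Char) (lo hi : Int) (hlo : 0 ≤ lo) (hhi : 0 ≤ hi) :
    ((PySem.List.slice row (some lo) (some hi)).any (fun c => pvSpecial.contains c))
    = !(PySem.Set.isdisjoint (bSymCols row) (PySem.List.pyRange lo hi 1)) := by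
  rw [PySem.List.slice_toNat row hlo hhi]
  simp only [PySem.Set.isdisjoint, Bool.not_not]
  rw [Bool.eq_iff_iff]
  simp only [List.any_eq_true]
  constructor
  · rintro ⟨c, hc, hspec⟩
    obtain ⟨k, h1, h2, h3, h4⟩ := (mem_take_drop row lo.toNat (hi.toNat - lo.toNat) c).mp hc
    refine ⟨(k : Int), (mem_bSymCols row _).mpr ⟨k, h3, rfl, by rw [h4]; exact (by simpa using hspec)⟩, ?_⟩
    simp only [PySem.Set.contains]
    apply List.elem_eq_true_of_mem
    rw [PySem.List.mem_pyRange_one]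
    omega
  · rintro ⟨x, hx, hcont⟩
    obtain ⟨k, hk, hxk, hc⟩ := (mem_bSymCols row x).mp hx
    simp only [PySem.Set.contains] at hcont
    rw [show (PySem.List.pyRange lo hi 1).contains x = true ↔ x ∈ PySem.List.pyRange lo hi 1 from ⟨List.mem_of_elem_eq_true, List.elem_eq_true_of_mem⟩, PySem.List.mem_pyRange_one] at hcont
    refine ⟨row[k], ?_, by simpa using hc⟩
    apply (mem_take_drop row lo.toNat (hi.toNat - lo.toNat) _).mpr
    exact ⟨k, by omega, by omega, hk, rfl⟩

lemma emit_eq (L : List (List Char)) (ln : Int) (cs : List Char) (acc : List Int)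
    (se : Nat × Nat) :
    emitA L ln cs acc se
    = (PySem.List.pyRange (max (ln - 1) 0) (min (ln + 2) (L.length : Int)) 1).foldl
        (fun a rr =>
          if ¬ PySem.Set.isdisjoint ((PySem.List.pyGet? (L.map bSymCols) rr).getD [])
              (PySem.List.pyRange (max ((se.1 : Int) - 1) 0) ((se.2 : Int) + 1) 1)
          then a ++ [pvNumAt cs se.1 se.2] else a) acc := by
  unfold emitA
  rw [squareA_map (fun rr => PySem.List.slice ((PySem.List.pyGet? L rr).getD [])
      (some (max ((se.1 : Int) - 1) 0)) (some ((se.2 : Int) + 1))) ln (L.length : Int)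
      (by positivity), List.foldl_map]
  apply PySem.List.foldl_congr_mem
  intro a rr hrr
  have hmem := PySem.List.mem_pyRange_one.mp hrr
  have h0 : 0 ≤ rr := le_trans (le_max_right _ _) hmem.1
  have hN : rr.toNat < L.length := by
    have := lt_of_lt_of_le hmem.2 (min_le_right _ _)
    omega
  have hcast : rr = ((rr.toNat : Nat) : Int) := by omega
  have h1 : rr < (L.length : Int) := by omega
  have h2 : 0 < L.length := by omega
  have hmax : max rr 0 = rr := by omega
  have hgetL : (PySem.List.pyGet? L rr).getD [] = L[rr.toNat] := by
    simp [PySem.List.pyGet?, PySem.List.pyIdx?, h0, h1, h2, hmax, List.getElem?_eq_getElem hN]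
  have hgetS : (PySem.List.pyGet? (L.map bSymCols) rr).getD [] = bSymCols L[rr.toNat] := by
    simp [PySem.List.pyGet?, PySem.List.pyIdx?, h0, h1, h2, hmax,
      List.getElem?_eq_getElem (show rr.toNat < (L.map bSymCols).length by simpa using hN)]
  rw [hgetL, hgetS,
    any_slice_eq L[rr.toNat] (max ((se.1 : Int) - 1) 0) ((se.2 : Int) + 1)
      (le_max_right _ _) (by positivity)]
  by_cases hdis : PySem.Set.isdisjoint (bSymCols L[rr.toNat])
      (PySem.List.pyRange (max ((se.1 : Int) - 1) 0) ((se.2 : Int) + 1) 1)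
  · simp [hdis]
  · simp [hdis]

-- ===== VERDICT (by name: the statement is the Claim_ definition above) =====
theorem find_part_numbers_spec : Claim_equal_find_part_numbers := by
  intro Lines _ _
  unfold Spec_find_part_numbers find_part_numbers find_part_numbers_alt
  apply PySem.List.foldl_congr_mem
  intro acc p _
  rw [aScan_eq _ _ _ _ _ _ (by omega)]
  unfold bRuns
  apply PySem.List.foldl_congr_mem
  intro a se _
  exact emit_eq (Lines.map String.toList) p.1 p.2 a se
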